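-- pv_equiv track=rewrite | github.com/TKTINC/true_asset_alluse | local-deployment/build/src/ws16_enhanced_conversational_ai/advanced_nlp/enhanced_query_processor.py | _determine_required_data
-- ===== SOURCE A (Python) =====
-- from typing import Dict, Any, Optional, List, Union, Tuple
--
-- def _determine_required_data(intent: str, entities: Dict[str, List[str]]) -> List[str]:
--     """Determine what data sources are needed for the query."""
--     data_sources = []
--
--     # Intent-based data sources
--     intent_data_map = {
--         "data_request": ["position_service", "performance_service"],
--         "analysis_request": ["analytics_service", "risk_service"],
--         "scenario_query": ["scenario_engine", "risk_service"],
--         "help_request": ["documentation_service"]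
--     }
--
--     data_sources.extend(intent_data_map.get(intent, []))
--
--     # Entity-based data sources
--     if "symbols" in entities:
--         data_sources.extend(["market_data", "position_service"])
--
--     if "metrics" in entities:
--         metrics = entities["metrics"]
--         if any(metric in ["delta", "gamma", "theta", "vega"] for metric in metrics):
--             data_sources.append("greeks_service")
--         if any(metric in ["pnl", "return", "sharpe"] for metric in metrics):
--             data_sources.append("performance_service")
--         if any(metric in ["var", "volatility", "beta"] for metric in metrics):
--             data_sources.append("risk_service")
--
--     return list(set(data_sources))
-- ===== SOURCE B (Python) =====
-- _INTENT_DATA = {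
--     "data_request": ["position_service", "performance_service"],
--     "analysis_request": ["analytics_service", "risk_service"],
--     "scenario_query": ["scenario_engine", "risk_service"],
--     "help_request": ["documentation_service"],
-- }
--
-- _METRIC_SERVICE = {
--     "delta": "greeks_service", "gamma": "greeks_service",
--     "theta": "greeks_service", "vega": "greeks_service",
--     "pnl": "performance_service", "return": "performance_service",
--     "sharpe": "performance_service",
--     "var": "risk_service", "volatility": "risk_service", "beta": "risk_service",
-- }
--
-- def _determine_required_data(intent, entities):
--     """Determine what data sources are needed for the query."""
--     sources = list(_INTENT_DATA.get(intent, []))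
--     if "symbols" in entities:
--         sources += ["market_data", "position_service"]
--     # one pass over the metrics: map each known metric to its service
--     needed = {_METRIC_SERVICE[m] for m in entities.get("metrics", []) if m in _METRIC_SERVICE}
--     sources += [s for s in ("greeks_service", "performance_service", "risk_service") if s in needed]
--     return list(set(sources))
-- ===== Notes on version B (the rewrite author's own statement) =====
-- stated objective: simpler
-- what changed: Replaces the three any()-over-category scans with a single metric-to-service mapping traversed in one pass over the metrics, collecting the needed services into a set and emitting them table-driven; the intent/symbols lookups stay, the final set() dedup is unchanged.
import Mathlib
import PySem

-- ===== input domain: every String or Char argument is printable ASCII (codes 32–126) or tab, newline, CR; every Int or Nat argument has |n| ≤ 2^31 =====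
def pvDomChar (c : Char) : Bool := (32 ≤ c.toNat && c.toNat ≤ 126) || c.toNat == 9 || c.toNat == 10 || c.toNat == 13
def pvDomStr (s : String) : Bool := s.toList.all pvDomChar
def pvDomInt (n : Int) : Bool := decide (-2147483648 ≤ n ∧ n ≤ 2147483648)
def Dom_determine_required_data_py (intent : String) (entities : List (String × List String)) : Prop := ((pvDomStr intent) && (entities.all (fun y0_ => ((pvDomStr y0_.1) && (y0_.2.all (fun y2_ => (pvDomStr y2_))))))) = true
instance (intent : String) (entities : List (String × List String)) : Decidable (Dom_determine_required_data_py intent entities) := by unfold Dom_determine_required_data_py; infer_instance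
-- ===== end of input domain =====

-- B replaces the three any()-over-category scans by one pass over the metrics through a
-- metric→service map, emitting the needed services table-driven; objective: simpler.


-- ===== PORT A =====
def determine_required_data_py (intent : String) (entities : List (String × List String)) : List String :=
  let ents : PySem.Dict String (List String) := PySem.Dict.mk entities
  let intent_data_map : PySem.Dict String (List String) := PySem.Dict.mk
    [("data_request", ["position_service", "performance_service"]),
     ("analysis_request", ["analytics_service", "risk_service"]),
     ("scenario_query", ["scenario_engine", "risk_service"]),
     ("help_request", ["documentation_service"])]
  let data_sources : List String := [] ++ PySem.Dict.getD intent_data_map intent []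
  let data_sources :=
    if PySem.Dict.contains ents "symbols" then data_sources ++ ["market_data", "position_service"]
    else data_sources
  let data_sources :=
    if PySem.Dict.contains ents "metrics" then
      let metrics := PySem.Dict.getD ents "metrics" []
      let data_sources :=
        if metrics.any (fun m => (["delta", "gamma", "theta", "vega"] : List String).contains m)
        then data_sources ++ ["greeks_service"] else data_sources
      let data_sources :=
        if metrics.any (fun m => (["pnl", "return", "sharpe"] : List String).contains m)
        then data_sources ++ ["performance_service"] else data_sources
      let data_sources :=
        if metrics.any (fun m => (["var", "volatility", "beta"] : List String).contains m)
        then data_sources ++ ["risk_service"] else data_sources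
      data_sources
    else data_sources
  PySem.Set.ofList data_sources   -- list(set(...)); consumed as a set (order not modelled)

-- ===== PORT B =====
def pvIntentData : PySem.Dict String (List String) := PySem.Dict.mk
  [("data_request", ["position_service", "performance_service"]),
   ("analysis_request", ["analytics_service", "risk_service"]),
   ("scenario_query", ["scenario_engine", "risk_service"]),
   ("help_request", ["documentation_service"])]

def pvMetricService : PySem.Dict String String := PySem.Dict.mk
  [("delta", "greeks_service"), ("gamma", "greeks_service"),
   ("theta", "greeks_service"), ("vega", "greeks_service"),
   ("pnl", "performance_service"), ("return", "performance_service"),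
   ("sharpe", "performance_service"),
   ("var", "risk_service"), ("volatility", "risk_service"), ("beta", "risk_service")]

def determine_required_data_py_alt (intent : String) (entities : List (String × List String)) : List String :=
  let ents : PySem.Dict String (List String) := PySem.Dict.mk entities
  let sources : List String := PySem.Dict.getD pvIntentData intent []
  let sources :=
    if PySem.Dict.contains ents "symbols" then sources ++ ["market_data", "position_service"]
    else sources
  let needed : PySem.Set String :=
    PySem.Set.ofList
      (((PySem.Dict.getD ents "metrics" []).filter
          (fun m => PySem.Dict.contains pvMetricService m)).map
        (fun m => PySem.Dict.getD pvMetricService m ""))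
  let sources := sources ++
    (["greeks_service", "performance_service", "risk_service"] : List String).filter
      (fun s => PySem.Set.contains needed s)
  PySem.Set.ofList sources   -- list(set(...)); consumed as a set (order not modelled)

-- ===== PRECONDITION & SPEC =====
def Spec_determine_required_data_py (intent : String) (entities : List (String × List String)) (out : List String) : Prop := out = determine_required_data_py_alt intent entities
instance (intent : String) (entities : List (String × List String)) (out : List String) : Decidable (Spec_determine_required_data_py intent entities out) := by unfold Spec_determine_required_data_py; infer_instance

-- ===== CLAIM (what is proved, stated in full; the proofs are below) =====
def Claim_equal_determine_required_data_py : Prop := ∀ (intent : String) (entities : List (String × List String)), Dom_determine_required_data_py intent entities → Spec_determine_required_data_py intent entities (determine_required_data_py intent entities)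

-- ===== LEMMAS AND PROOFS =====

theorem pv_get?_nil (m : String) :
    (PySem.Dict.mk ([] : List (String × String))).get? m = none := rfl

-- Per-metric bridge: a metric maps to service s under pvMetricService iff it lies in the
-- corresponding category list that A scans.
set_option maxRecDepth 4096 in
theorem pv_metric_all (m : String) :
    ((PySem.Dict.contains pvMetricService m &&
      (PySem.Dict.getD pvMetricService m "" == "greeks_service"))
    = (["delta", "gamma", "theta", "vega"] : List String).contains m)
    ∧ ((PySem.Dict.contains pvMetricService m &&
      (PySem.Dict.getD pvMetricService m "" == "performance_service"))
    = (["pnl", "return", "sharpe"] : List String).contains m)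
    ∧ ((PySem.Dict.contains pvMetricService m &&
      (PySem.Dict.getD pvMetricService m "" == "risk_service"))
    = (["var", "volatility", "beta"] : List String).contains m) := by
  rw [PySem.Dict.contains_eq_isSome_get?, PySem.Dict.getD_eq_get?_getD]
  simp only [pvMetricService, PySem.Dict.get?_mk_cons, beq_iff_eq]
  split_ifs <;> subst_vars <;>
    first
    | exact ⟨rfl, rfl, rfl⟩
    | (simp only [pv_get?_nil, Option.isSome_none, Bool.false_and]
       refine ⟨?_, ?_, ?_⟩ <;> symm <;> rw [Bool.eq_false_iff] <;> intro hc <;> simp at hc <;>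
         rcases hc with rfl | rfl | rfl | rfl <;> simp_all)

-- B's "s in needed" equals A's any()-scan of the corresponding category list.
theorem pv_needed_eq_any (metrics : List String) (s : String) (cat : List String)
    (h : ∀ m : String,
      (PySem.Dict.contains pvMetricService m && (PySem.Dict.getD pvMetricService m "" == s))
      = cat.contains m) :
    PySem.Set.contains
      (PySem.Set.ofList
        ((metrics.filter (fun m => PySem.Dict.contains pvMetricService m)).map
          (fun m => PySem.Dict.getD pvMetricService m ""))) s
    = metrics.any (fun m => cat.contains m) := by
  by_cases hb : (metrics.any (fun m => cat.contains m)) = true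
  · rw [hb, PySem.Set.contains_iff]
    obtain ⟨m, hm, hc⟩ := List.any_eq_true.mp hb
    rw [← h m] at hc
    simp only [Bool.and_eq_true, beq_iff_eq] at hc
    rw [PySem.Set.mem_ofList]
    exact List.mem_map.mpr ⟨m, List.mem_filter.mpr ⟨hm, hc.1⟩, hc.2⟩
  · rw [Bool.not_eq_true] at hb
    rw [hb, Bool.eq_false_iff]
    intro hcon
    rw [PySem.Set.contains_iff, PySem.Set.mem_ofList] at hcon
    obtain ⟨m, hmf, he⟩ := List.mem_map.mp hcon
    obtain ⟨hm, hp⟩ := List.mem_filter.mp hmf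
    have hcat : cat.contains m = true := by rw [← h m]; simp [hp, he]
    have hany : metrics.any (fun m => cat.contains m) = true :=
      List.any_eq_true.mpr ⟨m, hm, hcat⟩
    rw [hb] at hany
    exact Bool.false_ne_true hany

-- ===== VERDICT (by name: the statement is the Claim_ definition above) =====
theorem determine_required_data_py_spec : Claim_equal_determine_required_data_py := by
  intro intent entities _
  show _ = _
  unfold determine_required_data_py determine_required_data_py_alt
  simp only [pvIntentData, List.nil_append]
  set ents : PySem.Dict String (List String) := PySem.Dict.mk entities with hents
  set base : List String :=
    (if PySem.Dict.contains ents "symbols"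
     then PySem.Dict.getD (PySem.Dict.mk
        [("data_request", ["position_service", "performance_service"]),
         ("analysis_request", ["analytics_service", "risk_service"]),
         ("scenario_query", ["scenario_engine", "risk_service"]),
         ("help_request", ["documentation_service"])]) intent [] ++ ["market_data", "position_service"]
     else PySem.Dict.getD (PySem.Dict.mk
        [("data_request", ["position_service", "performance_service"]),
         ("analysis_request", ["analytics_service", "risk_service"]),
         ("scenario_query", ["scenario_engine", "risk_service"]),
         ("help_request", ["documentation_service"])]) intent []) with hbase
  by_cases hm : PySem.Dict.contains ents "metrics"
  · simp only [hm, if_true]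
    set metrics := PySem.Dict.getD ents "metrics" [] with hmet
    simp only [List.filter_cons, List.filter_nil]
    rw [pv_needed_eq_any metrics "greeks_service" _ (fun m => (pv_metric_all m).1),
        pv_needed_eq_any metrics "performance_service" _ (fun m => (pv_metric_all m).2.1),
        pv_needed_eq_any metrics "risk_service" _ (fun m => (pv_metric_all m).2.2)]
    generalize (metrics.any fun m => (["delta","gamma","theta","vega"] : List String).contains m) = b1
    generalize (metrics.any fun m => (["pnl","return","sharpe"] : List String).contains m) = b2
    generalize (metrics.any fun m => (["var","volatility","beta"] : List String).contains m) = b3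
    cases b1 <;> cases b2 <;> cases b3 <;> simp
  · -- no "metrics" key: entities.get("metrics", []) = [] in B, so needed is empty
    have hget : PySem.Dict.getD ents "metrics" [] = ([] : List String) := by
      apply PySem.Dict.getD_of_not_contains
      simpa using hm
    simp [hm, hget, List.filter, PySem.Set.contains]
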